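-- pv_equiv track=rewrite | github.com/sDaCoder/iitm_python | oppe1_set1/problem2.py | is_all_same_word_twice
-- ===== SOURCE A (Python) =====
-- def is_all_same_word_twice(strings: list) -> bool:
--     '''
--     Checks if all strings follow the format where
--     the same word is repeated exactly twice with a hyphen in-between them.
--
--     Args:
--         strings (list): A list of strings to be checked.
--
--     Returns:
--         bool: True if all strings are of the given format, otherwise False.
--     '''
--     for string in strings:
--         if '-' not in string:
--             return False
--         if string == "-":
--             return False
--
--         parts = string.split("-")
--         if len(parts) != 2:
--             return False
--         if parts[0] != parts[1]:
--             return False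
--     return True
-- ===== SOURCE B (Python) =====
-- def is_all_same_word_twice(strings: list) -> bool:
--     '''Midpoint check: a valid string is word-hyphen-word, so it has odd length,
--     a hyphen exactly in the middle, a hyphen-free left half, and equal halves.'''
--     def ok(s):
--         k = len(s) // 2
--         return len(s) % 2 == 1 and k >= 1 and s[k] == '-' and '-' not in s[:k] and s[:k] == s[k + 1:]
--     return all(ok(s) for s in strings)
-- ===== Notes on version B (the rewrite author's own statement) =====
-- stated objective: alternative
-- what changed: Per-string validity is decided by a midpoint check (odd length, hyphen exactly in the middle, hyphen-free equal halves compared by slicing) folded with all(), instead of A's loop that splits each string on '-' and compares the two parts.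
import Mathlib
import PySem

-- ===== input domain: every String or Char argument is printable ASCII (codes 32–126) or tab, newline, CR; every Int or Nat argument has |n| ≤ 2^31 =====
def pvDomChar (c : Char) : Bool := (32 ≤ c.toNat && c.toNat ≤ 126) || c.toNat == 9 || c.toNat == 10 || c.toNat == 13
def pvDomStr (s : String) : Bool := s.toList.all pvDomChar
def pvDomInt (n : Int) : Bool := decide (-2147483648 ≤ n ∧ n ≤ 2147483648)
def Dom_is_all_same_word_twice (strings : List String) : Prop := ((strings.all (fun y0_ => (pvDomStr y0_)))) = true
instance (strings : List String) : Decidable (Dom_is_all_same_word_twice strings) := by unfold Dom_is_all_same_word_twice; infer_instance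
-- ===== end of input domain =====

-- B replaces A's split-on-hyphen-and-compare-parts loop by a midpoint check per string
-- (odd length, '-' exactly in the middle, hyphen-free equal halves) folded with all();
-- objective: alternative algorithm, same cost.

-- ===== PORT A =====
def is_all_same_word_twice (strings : List String) : Bool :=
  match strings with
  | [] => true  -- return True after the loop
  | s :: rest =>
    if !(PySem.Str.isIn "-" s) then false          -- if '-' not in string: return False
    else if s == "-" then false                    -- if string == "-": return False
    else
      -- parts = string.split("-"); the separator "-" is nonempty, so Chars.splitOn is exact
      let parts := PySem.Chars.splitOn s.toList ['-']
      if parts.length ≠ 2 then false               -- if len(parts) != 2: return False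
      -- parts[0] != parts[1]; both indices are in range since len(parts) == 2 here
      else if parts.getD 0 [] ≠ parts.getD 1 [] then false
      else is_all_same_word_twice rest

-- ===== PORT B =====
-- ok(s) from Source B, on the character list of the string; `and` short-circuits, and s[k] is
-- only reached with len(s) odd, hence 0 ≤ k < len(s), so pyGet? returns some there.
def pvOk (s : List Char) : Bool :=
  let k : Nat := s.length / 2                      -- k = len(s) // 2 (len(s) ≥ 0: Nat division is exact)
  (s.length % 2 == 1) && decide (1 ≤ k)
    && (PySem.List.pyGet? s (k : Int) == some '-')                         -- s[k] == '-'
    && !(PySem.Chars.isIn ['-'] (PySem.List.slice s none (some (k : Int))))  -- '-' not in s[:k]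
    && (PySem.List.slice s none (some (k : Int))
          == PySem.List.slice s (some ((k : Int) + 1)) none)               -- s[:k] == s[k+1:]

def is_all_same_word_twice_alt (strings : List String) : Bool :=
  strings.all (fun s => pvOk s.toList)             -- all(ok(s) for s in strings)

-- ===== PRECONDITION & SPEC =====
def Spec_is_all_same_word_twice (strings : List String) (out : Bool) : Prop := out = is_all_same_word_twice_alt strings
instance (strings : List String) (out : Bool) : Decidable (Spec_is_all_same_word_twice strings out) := by unfold Spec_is_all_same_word_twice; infer_instance

-- ===== CLAIM (what is proved, stated in full; the proofs are below) =====
def Claim_equal_is_all_same_word_twice : Prop := ∀ (strings : List String), Dom_is_all_same_word_twice strings → Spec_is_all_same_word_twice strings (is_all_same_word_twice strings)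

-- ===== LEMMAS AND PROOFS =====

-- The canonical shape both per-string checks recognise: word, hyphen, the same word again.
def pvShape (cs : List Char) : Prop := ∃ w, w ≠ [] ∧ '-' ∉ w ∧ cs = w ++ '-' :: w

-- Reference splitter: what string.split("-") produces, in direct structural form.
def pvSplit : List Char → List Char → List (List Char)
  | [], cur => [cur.reverse]
  | c :: rest, cur => if c = '-' then cur.reverse :: pvSplit rest [] else pvSplit rest (c :: cur)

theorem pvSplit_go (l : List Char) : ∀ (fuel : Nat) (cur : List Char) (acc : List (List Char)),
    l.length < fuel →
    PySem.Chars.splitOn.go ['-'] fuel l cur acc = acc.reverse ++ pvSplit l cur := by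
  induction l with
  | nil =>
    intro fuel cur acc h
    cases fuel with
    | zero => exact absurd h (by simp)
    | succ f =>
      rw [PySem.Chars.splitOn.go]
      simp [pvSplit]
      omega
  | cons c rest ih =>
    intro fuel cur acc h
    cases fuel with
    | zero => exact absurd h (by simp)
    | succ f =>
      have hlt : rest.length < f := by simp at h; omega
      rw [PySem.Chars.splitOn.go]
      by_cases hc : c = '-'
      · subst hc
        have h1 := ih f [] (cur.reverse :: acc) hlt
        simp [List.isPrefixOf, h1, pvSplit]
      · have hc' : ¬('-' = c) := fun h => hc h.symm
        have h1 := ih f (c :: cur) acc hlt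
        simp [List.isPrefixOf, hc', h1, pvSplit, hc]

theorem pvSplitOn_eq (cs : List Char) : PySem.Chars.splitOn cs ['-'] = pvSplit cs [] := by
  unfold PySem.Chars.splitOn
  rw [pvSplit_go cs (cs.length + 1) [] [] (Nat.lt_succ_self _)]
  simp

theorem pvSplit_ne_nil : ∀ (l cur : List Char), pvSplit l cur ≠ [] := by
  intro l
  induction l with
  | nil => intro cur; simp [pvSplit]
  | cons c rest ih =>
    intro cur
    by_cases hc : c = '-'
    · simp [pvSplit, hc]
    · simpa [pvSplit, hc] using ih (c :: cur)

theorem pvSplit_cons_hyphen (rest cur : List Char) :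
    pvSplit ('-' :: rest) cur = cur.reverse :: pvSplit rest [] := by
  simp [pvSplit]

theorem pvSplit_single : ∀ (l cur r : List Char), pvSplit l cur = [r] → '-' ∉ l ∧ r = cur.reverse ++ l := by
  intro l
  induction l with
  | nil => intro cur r h; simp [pvSplit] at h; simp [h]
  | cons c rest ih =>
    intro cur r h
    by_cases hc : c = '-'
    · subst hc
      rw [pvSplit_cons_hyphen] at h
      injection h with h1 h2
      exact absurd h2 (pvSplit_ne_nil rest [])
    · simp only [pvSplit, if_neg hc] at h
      obtain ⟨h1, h2⟩ := ih (c :: cur) r h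
      refine ⟨?_, by simp [h2]⟩
      intro hm
      rcases List.mem_cons.mp hm with h' | h'
      · exact hc h'.symm
      · exact h1 h'

theorem pvSplit_pair : ∀ (l cur p q : List Char), pvSplit l cur = [p, q] →
    ∃ a b, '-' ∉ a ∧ '-' ∉ b ∧ l = a ++ '-' :: b ∧ p = cur.reverse ++ a ∧ q = b := by
  intro l
  induction l with
  | nil => intro cur p q h; simp [pvSplit] at h
  | cons c rest ih =>
    intro cur p q h
    by_cases hc : c = '-'
    · subst hc
      rw [pvSplit_cons_hyphen] at h
      injection h with hp hq
      obtain ⟨h1, h2⟩ := pvSplit_single rest [] q hq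
      exact ⟨[], rest, by simp, h1, by simp, by simp [hp], by simpa using h2⟩
    · simp only [pvSplit, if_neg hc] at h
      obtain ⟨a, b, ha, hb, hl, hp, hq⟩ := ih (c :: cur) p q h
      refine ⟨c :: a, b, ?_, hb, by simp [hl], by simp [hp], hq⟩
      intro hm
      rcases List.mem_cons.mp hm with h' | h'
      · exact hc h'.symm
      · exact ha h'

theorem pvSplit_no_hyphen : ∀ (w cur : List Char), '-' ∉ w → pvSplit w cur = [cur.reverse ++ w] := by
  intro w
  induction w with
  | nil => intro cur _; simp [pvSplit]
  | cons c rest ih =>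
    intro cur h
    have hc : c ≠ '-' := fun hc => h (hc ▸ List.mem_cons_self)
    simp only [pvSplit, if_neg hc]
    rw [ih (c :: cur) (fun hm => h (List.mem_cons_of_mem _ hm))]
    simp

theorem pvSplit_shape (w : List Char) (h : '-' ∉ w) : pvSplit (w ++ '-' :: w) [] = [w, w] := by
  have key : ∀ (a : List Char) (cur : List Char), '-' ∉ a →
      pvSplit (a ++ '-' :: w) cur = (cur.reverse ++ a) :: [w] := by
    intro a
    induction a with
    | nil =>
      intro cur _
      rw [List.nil_append, pvSplit_cons_hyphen, pvSplit_no_hyphen w [] h]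
      simp
    | cons c rest ih =>
      intro cur ha
      have hc : c ≠ '-' := fun hc => ha (hc ▸ List.mem_cons_self)
      simp only [List.cons_append, pvSplit, if_neg hc]
      rw [ih (c :: cur) (fun hm => ha (List.mem_cons_of_mem _ hm))]
      simp
  simpa using key w [] h

-- A's guards on one string hold exactly on shaped strings.
theorem pvA_guards_iff (s : String) :
    (PySem.Str.isIn "-" s = true ∧ s ≠ "-" ∧
      (PySem.Chars.splitOn s.toList ['-']).length = 2 ∧
      (PySem.Chars.splitOn s.toList ['-']).getD 0 [] = (PySem.Chars.splitOn s.toList ['-']).getD 1 []) ↔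
    pvShape s.toList := by
  rw [pvSplitOn_eq]
  constructor
  · rintro ⟨-, hne, hlen, heq⟩
    obtain ⟨p, q, hpq⟩ := List.length_eq_two.mp hlen
    obtain ⟨a, b, ha, hb, hl, hp, hq⟩ := pvSplit_pair _ _ _ _ hpq
    rw [hpq] at heq
    simp only [List.getD_cons_zero, List.getD_cons_succ] at heq
    have hab : a = b := by rw [hp, hq] at heq; simpa using heq
    refine ⟨a, ?_, ha, by rw [hl, hab]⟩
    intro ha0
    apply hne
    rw [← String.toList_inj, hl, ha0, ← hab, ha0]
    decide
  · rintro ⟨w, hw, hnw, hcs⟩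
    have htl : "-".toList = ['-'] := by decide
    refine ⟨?_, ?_, ?_, ?_⟩
    · rw [PySem.Str.isIn_eq, htl, hcs]
      exact (PySem.Chars.isIn_iff_infix _ _).mpr ((List.singleton_infix_iff _ _).mpr (by simp))
    · intro hs
      rw [hs, htl] at hcs
      have h1 := congrArg List.length hcs
      simp at h1
      exact hw (List.eq_nil_of_length_eq_zero (by omega))
    · rw [hcs, pvSplit_shape w hnw]; rfl
    · rw [hcs, pvSplit_shape w hnw]; rfl

-- B's midpoint check holds exactly on shaped strings.
theorem pvOk_iff (cs : List Char) : pvOk cs = true ↔ pvShape cs := by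
  have hslice1 : PySem.List.slice cs none (some ((cs.length / 2 : Nat) : Int))
      = cs.take (cs.length / 2) := by
    rw [PySem.List.slice_to cs (by positivity)]
    congr 1
  have hslice2 : PySem.List.slice cs (some (((cs.length / 2 : Nat) : Int) + 1)) none
      = cs.drop (cs.length / 2 + 1) := by
    rw [PySem.List.slice_from cs (by positivity)]
    congr 1
  unfold pvOk
  simp only [hslice1, hslice2, Bool.and_eq_true, beq_iff_eq, decide_eq_true_eq,
    Bool.not_eq_true', PySem.List.pyGet?_natCast]
  constructor
  · rintro ⟨⟨⟨⟨h1, h2⟩, h3⟩, h4⟩, h5⟩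
    have hklt : cs.length / 2 < cs.length := by omega
    have hget : cs[cs.length / 2] = '-' := by
      rw [List.getElem?_eq_getElem hklt] at h3
      exact Option.some.inj h3
    refine ⟨cs.take (cs.length / 2), ?_, ?_, ?_⟩
    · intro h0
      have := congrArg List.length h0
      simp [Nat.min_eq_left (Nat.le_of_lt hklt)] at this
      omega
    · intro hm
      have h6 : PySem.Chars.isIn ['-'] (cs.take (cs.length / 2)) = true :=
        (PySem.Chars.isIn_iff_infix _ _).mpr ((List.singleton_infix_iff _ _).mpr hm)
      rw [h4] at h6
      exact Bool.false_ne_true h6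
    · conv_lhs => rw [← List.take_append_drop (cs.length / 2) cs]
      rw [List.drop_eq_getElem_cons hklt, hget, h5]
  · rintro ⟨w, hw, hnw, hcs⟩
    subst hcs
    have hwpos : 1 ≤ w.length := List.length_pos_iff.mpr hw
    have hlen : (w ++ '-' :: w).length = 2 * w.length + 1 := by simp; omega
    rw [hlen]
    have hk2 : (2 * w.length + 1) / 2 = w.length := by omega
    rw [hk2]
    refine ⟨⟨⟨⟨by omega, hwpos⟩, ?_⟩, ?_⟩, ?_⟩
    · rw [List.getElem?_append_right (Nat.le_refl _)]
      simp
    · rw [List.take_left]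
      rcases h : PySem.Chars.isIn ['-'] w with _ | _
      · rfl
      · exact absurd ((List.singleton_infix_iff _ _).mp ((PySem.Chars.isIn_iff_infix _ _).mp h)) hnw
    · rw [List.take_left]
      simp

theorem pvMain : ∀ (strings : List String),
    is_all_same_word_twice strings = is_all_same_word_twice_alt strings := by
  intro strings
  induction strings with
  | nil => rfl
  | cons s rest ih =>
    show is_all_same_word_twice (s :: rest) = (pvOk s.toList && is_all_same_word_twice_alt rest)
    rw [is_all_same_word_twice]
    by_cases hok : pvOk s.toList = true
    · obtain ⟨h1, h2, h3, h4⟩ := (pvA_guards_iff s).mpr ((pvOk_iff s.toList).mp hok)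
      have h1' : PySem.Chars.isIn ['-'] s.toList = true := by
        rw [PySem.Str.isIn_eq] at h1
        simpa using h1
      have h4' : (PySem.Chars.splitOn s.toList ['-'])[0]?.getD []
          = (PySem.Chars.splitOn s.toList ['-'])[1]?.getD [] := by
        simpa [List.getD_eq_getElem?_getD] using h4
      rw [hok, Bool.true_and]
      rw [if_neg (by simp [h1']), if_neg (by simp [h2]), if_neg (by simp [h3]),
        if_neg (by simp [h4'])]
      exact ih
    · rw [Bool.not_eq_true] at hok
      rw [hok, Bool.false_and]
      have hng : ¬ (PySem.Str.isIn "-" s = true ∧ s ≠ "-" ∧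
          (PySem.Chars.splitOn s.toList ['-']).length = 2 ∧
          (PySem.Chars.splitOn s.toList ['-']).getD 0 [] = (PySem.Chars.splitOn s.toList ['-']).getD 1 []) :=
        fun h => by rw [(pvOk_iff s.toList).mpr ((pvA_guards_iff s).mp h)] at hok; simp at hok
      by_cases g1 : (!PySem.Str.isIn "-" s) = true
      · rw [if_pos g1]
      · rw [if_neg g1]
        by_cases g2 : (s == "-") = true
        · rw [if_pos g2]
        · rw [if_neg g2]
          show (if (PySem.Chars.splitOn s.toList ['-']).length ≠ 2 then false
            else if (PySem.Chars.splitOn s.toList ['-']).getD 0 []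
                ≠ (PySem.Chars.splitOn s.toList ['-']).getD 1 [] then false
            else is_all_same_word_twice rest) = false
          by_cases g3 : (PySem.Chars.splitOn s.toList ['-']).length ≠ 2
          · rw [if_pos g3]
          · rw [if_neg g3]
            by_cases g4 : (PySem.Chars.splitOn s.toList ['-']).getD 0 []
                ≠ (PySem.Chars.splitOn s.toList ['-']).getD 1 []
            · rw [if_pos g4]
            · exact absurd ⟨by simpa using g1, by simpa using g2, by omega, by simpa using g4⟩ hng

-- ===== VERDICT (by name: the statement is the Claim_ definition above) =====
theorem is_all_same_word_twice_spec : Claim_equal_is_all_same_word_twice := by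
  intro strings _
  show is_all_same_word_twice strings = is_all_same_word_twice_alt strings
  exact pvMain strings
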